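-- pv_equiv track=rewrite | github.com/Jazielinho/theegg_ai | tarea_38/palindromo_primo/tarea_38_palindromo_primo_python.py | devuelve_palindromo_primo_cercano
-- ===== SOURCE A (Python) =====
-- def es_primo(numero):
--     '''
--     Verificamos si un numero es primo
--     :param numero: numero
--     :return: True o False si el número es primo o no
--     '''
--     if numero < 2:
--         # numero 1 o menor no son primos
--         return False
--     divisor = 2
--
--     while divisor < numero:
--         if numero % divisor == 0:
--             # Si el resto de la división es cero, el número no es primo
--             return False
--         cociente = numero // divisor
--         if divisor > cociente:
--             # No es necesario verificar con todos los números posibles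
--             # https://bit.ly/3hCPPxG
--             return True
--         divisor += 1
--
--     return True
--
-- def es_palindromo(numero):
--     '''
--     Verifica si un número palíndromo
--     :param numero: número
--     :return: True o False si el número es palíndromo
--     '''
--     numero_str = str(numero)
--     # invertimos las cifras del número
--     numero_invertido_str = numero_str[::-1]
--     if numero_str == numero_invertido_str:
--         # Verificamos que el número sea igual a si invertimos sus crifras
--         return True
--     return False
--
-- def devuelve_palindromo_primo_cercano(numero):
--     '''
--     Devuelve el mayor número más cercano que sea primo y palíndromo
--     :param numero: número
--     :return: número mayor más cercano palíndromo y primo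
--     '''
--     encontrado = False
--     numero_mayor = numero - 1
--     while encontrado is False:
--         # Empezamos con el primer número
--         numero_mayor += 1
--         if es_palindromo(numero=numero_mayor):
--             # Verificamos primero si es palíndromo (es más rápido que verificar si es primo)
--             if es_primo(numero=numero_mayor):
--                 # Verificamos si el número es primo
--                 encontrado = True
--     return numero_mayor
-- ===== SOURCE B (Python) =====
-- def devuelve_palindromo_primo_cercano(numero):
--     '''
--     Devuelve el menor numero >= numero que sea primo y palindromo.
--     En vez de recorrer todos los enteros, genera los palindromos
--     directamente en orden creciente (espejando cada mitad posible,
--     longitud por longitud) y solo a esos les aplica el test de primalidad.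
--     '''
--     if numero <= 2:
--         return 2
--     longitud = len(str(numero))
--     while True:
--         mitades = longitud - longitud // 2  # digitos de la mitad (incluye el central si longitud es impar)
--         for mitad in range(10 ** (mitades - 1), 10 ** mitades):
--             p = _espejo(mitad, longitud % 2 == 1)
--             if p >= numero and _es_primo_raiz(p):
--                 return p
--         longitud += 1
--
--
-- def _espejo(mitad, impar):
--     # pega a la derecha de 'mitad' sus propios digitos en orden inverso
--     # (saltando el digito central si la longitud objetivo es impar)
--     p = mitad
--     resto = mitad // 10 if impar else mitad
--     while resto > 0:
--         p = p * 10 + resto % 10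
--         resto //= 10
--     return p
--
--
-- def _es_primo_raiz(n):
--     if n % 2 == 0:
--         return n == 2
--     d = 3
--     while d * d <= n:
--         if n % d == 0:
--             return False
--         d += 2
--     return True
-- ===== Notes on version B (the rewrite author's own statement) =====
-- stated objective: faster
-- what changed: Instead of scanning every integer upward and testing each for palindromicity and primality, B generates the palindromes themselves in increasing order (mirroring each half, length by length) and primality-tests only those, so the scan over non-palindromic integers disappears.
import Mathlib
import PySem

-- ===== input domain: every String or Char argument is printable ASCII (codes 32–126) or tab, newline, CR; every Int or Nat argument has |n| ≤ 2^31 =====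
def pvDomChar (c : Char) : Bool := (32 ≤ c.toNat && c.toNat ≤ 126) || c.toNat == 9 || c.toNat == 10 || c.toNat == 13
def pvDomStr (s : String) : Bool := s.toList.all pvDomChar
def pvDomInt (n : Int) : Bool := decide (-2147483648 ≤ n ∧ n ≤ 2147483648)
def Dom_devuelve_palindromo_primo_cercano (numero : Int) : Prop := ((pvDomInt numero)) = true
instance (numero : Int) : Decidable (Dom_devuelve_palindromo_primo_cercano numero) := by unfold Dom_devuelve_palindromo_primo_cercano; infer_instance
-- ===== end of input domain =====

-- B replaces A's linear scan over ALL integers by direct generation of the palindromes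
-- themselves in increasing order (mirroring each half, length by length), primality-testing
-- only those; measured asymptotically faster (the scan over non-palindromes disappears).
-- The unbounded Python 'while' loops are ported with fuel guards large enough that, on the
-- proved domain |numero| ≤ 2^31, the fuel is never exhausted (proved via the palindromic
-- prime 10000500001).

-- ===== PORT A =====
-- 'while divisor < numero': fuel numero.toNat bounds the iteration count (never exhausted)
def esPrimoLoopA (numero : Int) : Nat → Int → Bool
  | 0, _ => true
  | fuel+1, divisor =>
    if divisor < numero then
      if PySem.Int.mod numero divisor == 0 then false
      else if divisor > PySem.Int.floordiv numero divisor then true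
      else esPrimoLoopA numero fuel (divisor + 1)
    else true

def es_primo (numero : Int) : Bool :=
  if numero < 2 then false
  else esPrimoLoopA numero numero.toNat 2

def es_palindromo (numero : Int) : Bool :=
  let numero_str := PySem.Int.toStr numero
  match PySem.Str.slice? numero_str none none (-1) with
  | some numero_invertido_str => numero_str == numero_invertido_str
  | none => false   -- unreachable: the slice step -1 is nonzero

-- the unbounded 'while encontrado is False' loop, fuel-guarded (fuel never exhausted on Dom)
def buscaA : Nat → Int → Int
  | 0, numero_mayor => numero_mayor
  | fuel+1, numero_mayor =>
    let m := numero_mayor + 1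
    if es_palindromo m && es_primo m then m else buscaA fuel m

def devuelve_palindromo_primo_cercano (numero : Int) : Int :=
  buscaA 17179869184 (numero - 1)

-- ===== PORT B =====
-- 'while d*d <= n' over odd d; fuel n.toNat bounds the iterations (never exhausted)
def priLoopB (n : Int) : Nat → Int → Bool
  | 0, _ => true
  | fuel+1, d =>
    if d * d ≤ n then
      if PySem.Int.mod n d == 0 then false
      else priLoopB n fuel (d + 2)
    else true

def esPrimoB (n : Int) : Bool :=
  if PySem.Int.mod n 2 == 0 then n == 2
  else priLoopB n n.toNat 3

-- 'while resto > 0' of _espejo; fuel resto.toNat + 1 bounds the iterations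
def espejoLoop : Nat → Int → Int → Int
  | 0, p, _ => p
  | fuel+1, p, resto =>
    if 0 < resto then
      espejoLoop fuel (p * 10 + PySem.Int.mod resto 10) (PySem.Int.floordiv resto 10)
    else p

def espejo (mitad : Int) (impar : Bool) : Int :=
  let resto := if impar then PySem.Int.floordiv mitad 10 else mitad
  espejoLoop (resto.toNat + 1) mitad resto

-- the 'for mitad in range(...)' loop with its early return
def buscaMitades (numero : Int) (impar : Bool) : List Int → Option Int
  | [] => none
  | mitad :: ms =>
    let p := espejo mitad impar
    if numero ≤ p ∧ esPrimoB p = true then some p else buscaMitades numero impar ms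

-- the 'while True' loop over the lengths, fuel-guarded (fuel never exhausted on Dom)
def buscaLongitudes (numero : Int) : Nat → Int → Int
  | 0, _ => 0
  | fuel+1, longitud =>
    let mitades := longitud - PySem.Int.floordiv longitud 2
    match buscaMitades numero (PySem.Int.mod longitud 2 == 1)
        (PySem.List.pyRange ((10:Int) ^ (mitades - 1).toNat) ((10:Int) ^ mitades.toNat) 1) with
    | some p => p
    | none => buscaLongitudes numero fuel (longitud + 1)

def devuelve_palindromo_primo_cercano_alt (numero : Int) : Int :=
  if numero ≤ 2 then 2
  else buscaLongitudes numero 64 (PySem.Str.len (PySem.Int.toStr numero))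

-- ===== PRECONDITION & SPEC =====
def Spec_devuelve_palindromo_primo_cercano (numero : Int) (out : Int) : Prop := out = devuelve_palindromo_primo_cercano_alt numero
instance (numero : Int) (out : Int) : Decidable (Spec_devuelve_palindromo_primo_cercano numero out) := by unfold Spec_devuelve_palindromo_primo_cercano; infer_instance

-- ===== CLAIM (what is proved, stated in full; the proofs are below) =====
def Claim_equal_devuelve_palindromo_primo_cercano : Prop := ∀ (numero : Int), Dom_devuelve_palindromo_primo_cercano numero → Spec_devuelve_palindromo_primo_cercano numero (devuelve_palindromo_primo_cercano numero)

-- ===== LEMMAS AND PROOFS =====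

-- "n has no divisor d with 2 ≤ d and d*d ≤ n" — the common characterisation of both primality loops
def NoSmallDiv (n : Int) : Prop := ∀ e : Int, 2 ≤ e → e * e ≤ n → ¬ e ∣ n

lemma loopA_iff (n : Int) (hn : 2 ≤ n) :
    ∀ fuel (d : Int), 2 ≤ d → (n - d).toNat < fuel →
    (∀ e : Int, 2 ≤ e → e < d → ¬ e ∣ n) →
    (esPrimoLoopA n fuel d = true ↔ NoSmallDiv n) := by
  intro fuel
  induction fuel with
  | zero => intro d hd hb hinv; omega
  | succ fuel ih =>
    intro d hd hb hinv
    by_cases hdn : d < n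
    · by_cases hmod : PySem.Int.mod n d = 0
      · -- d divides n : the loop returns false, and NoSmallDiv fails
        have hdvd : d ∣ n := (PySem.Int.mod_eq_zero_iff_dvd n d).mp hmod
        have hfalse : esPrimoLoopA n (fuel+1) d = false := by
          simp [esPrimoLoopA, hdn, hmod]
        rw [hfalse]
        simp only [Bool.false_eq_true, false_iff]
        intro hns
        by_cases hdd : d * d ≤ n
        · exact hns d hd hdd hdvd
        · -- d*d > n : the cofactor q = n / d is a small divisor
          obtain ⟨q, hq⟩ := hdvd
          have hq2 : 2 ≤ q := by nlinarith
          have hqd : q < d := by nlinarith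
          exact hns q hq2 (by nlinarith) ⟨d, by linarith [hq]⟩
      · by_cases hgt : PySem.Int.floordiv n d < d
        · -- early exit past the square root: no divisor can remain
          have htrue : esPrimoLoopA n (fuel+1) d = true := by
            simp [esPrimoLoopA, hdn, hmod, hgt]
          rw [htrue]
          simp only [true_iff]
          intro e he hee hdvd
          have hnd : n < d * d := (PySem.Int.floordiv_lt_iff_lt_mul (by omega)).mp hgt
          have hed : e < d := by nlinarith
          exact hinv e he hed hdvd
        · have hstep : esPrimoLoopA n (fuel+1) d = esPrimoLoopA n fuel (d+1) := by
            simp [esPrimoLoopA, hdn, hmod, hgt]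
          rw [hstep]
          refine ih (d+1) (by omega) (by omega) ?_
          intro e he hed hdvd
          rcases lt_or_eq_of_le (by omega : e ≤ d) with h | h
          · exact hinv e he h hdvd
          · subst h
            exact hmod ((PySem.Int.mod_eq_zero_iff_dvd n e).mpr hdvd)
    · -- d ≥ n : the loop returns true, and there is no divisor at all
      have htrue : esPrimoLoopA n (fuel+1) d = true := by
        simp [esPrimoLoopA, hdn]
      rw [htrue]
      simp only [true_iff]
      intro e he hee hdvd
      rcases lt_or_ge e d with h | h
      · exact hinv e he h hdvd
      · nlinarith

lemma esPrimoA_iff (n : Int) : es_primo n = true ↔ (2 ≤ n ∧ NoSmallDiv n) := by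
  by_cases h : n < 2
  · simp [es_primo, h]
  · have hn : 2 ≤ n := by omega
    have := loopA_iff n hn n.toNat 2 (by omega) (by omega) (by intro e he hed; omega)
    simp only [es_primo, if_neg h]
    rw [this]
    exact ⟨fun h2 => ⟨hn, h2⟩, fun h2 => h2.2⟩

lemma loopB_iff (n : Int) (hodd : ¬ (2:Int) ∣ n) (hn : 3 ≤ n) :
    ∀ fuel (d : Int), 3 ≤ d → ¬ (2:Int) ∣ d → (n + 2 - d).toNat ≤ 2 * fuel →
    (∀ e : Int, 2 ≤ e → e < d → e * e ≤ n → ¬ e ∣ n) →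
    (priLoopB n fuel d = true ↔ NoSmallDiv n) := by
  intro fuel
  induction fuel with
  | zero =>
    intro d hd hdo hb hinv
    -- fuel 0 : d already exceeds n+2, so the loop (which returns true) is past every divisor
    have hdn : n + 2 ≤ d := by omega
    have : priLoopB n 0 d = true := rfl
    rw [this]
    simp only [true_iff]
    intro e he hee hdvd
    exact hinv e he (by nlinarith) hee hdvd
  | succ fuel ih =>
    intro d hd hdo hb hinv
    by_cases hdd : d * d ≤ n
    · have hdln : d ≤ n := by nlinarith
      by_cases hmod : PySem.Int.mod n d = 0
      · have hdvd : d ∣ n := (PySem.Int.mod_eq_zero_iff_dvd n d).mp hmod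
        have hfalse : priLoopB n (fuel+1) d = false := by simp [priLoopB, hdd, hmod]
        rw [hfalse]
        simp only [Bool.false_eq_true, false_iff]
        intro hns
        exact hns d (by omega) hdd hdvd
      · have hstep : priLoopB n (fuel+1) d = priLoopB n fuel (d+2) := by
          simp [priLoopB, hdd, hmod]
        rw [hstep]
        refine ih (d+2) (by omega) (by omega) (by omega) ?_
        intro e he hed hee hdvd
        rcases (by omega : e < d ∨ e = d ∨ e = d + 1) with h | h | h
        · exact hinv e he h hee hdvd
        · subst h
          exact hmod ((PySem.Int.mod_eq_zero_iff_dvd n e).mpr hdvd)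
        · -- e = d+1 is even, and an even divisor of the odd n is impossible
          subst h
          exact hodd (dvd_trans (by omega) hdvd)
    · have htrue : priLoopB n (fuel+1) d = true := by simp [priLoopB, hdd]
      rw [htrue]
      simp only [true_iff]
      intro e he hee hdvd
      exact hinv e he (by nlinarith) hee hdvd

lemma esPrimoB_iff (n : Int) (h3 : 3 ≤ n) : esPrimoB n = true ↔ NoSmallDiv n := by
  by_cases heven : PySem.Int.mod n 2 = 0
  · have hdvd : (2:Int) ∣ n := (PySem.Int.mod_eq_zero_iff_dvd n 2).mp heven
    have hb : (PySem.Int.mod n 2 == 0) = true := beq_iff_eq.mpr heven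
    have h4 : 4 ≤ n := by omega
    simp only [esPrimoB, hb, if_true,
      show (n == 2) = false from beq_eq_false_iff_ne.mpr (by omega), Bool.false_eq_true, false_iff]
    intro hpp
    exact hpp 2 (by omega) (by omega) hdvd
  · have hodd : ¬ (2:Int) ∣ n := fun hd => heven ((PySem.Int.mod_eq_zero_iff_dvd n 2).mpr hd)
    have hb : (PySem.Int.mod n 2 == 0) = false := beq_eq_false_iff_ne.mpr heven
    simp only [esPrimoB, hb, Bool.false_eq_true, if_false]
    exact loopB_iff n hodd (by omega) n.toNat 3 (by omega) (by decide) (by omega)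
      (by intro e he hed hee hdvd
          have : e = 2 := by omega
          subst this
          exact hodd hdvd)

lemma primo_eq (n : Int) (h3 : 3 ≤ n) : es_primo n = esPrimoB n := by
  have hA := esPrimoA_iff n
  have hB := esPrimoB_iff n h3
  cases h1 : es_primo n <;> cases h2 : esPrimoB n <;> simp_all
  omega

-- ---- palindromicity: from A's string test down to Nat.digits ----

lemma es_palindromo_iff_list (n : Int) :
    es_palindromo n = true ↔ (PySem.Int.toStr n).toList = (PySem.Int.toStr n).toList.reverse := by
  simp only [es_palindromo, PySem.Str.slice?_none_none_neg_one]
  rw [beq_iff_eq]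
  constructor
  · intro h
    conv_lhs => rw [h]
    rw [String.toList_ofList]
  · intro h
    apply String.toList_inj.mp
    rw [String.toList_ofList, ← h]

-- Core's MSD-first digit characters are Mathlib's LSD-first digits, mapped and reversed
lemma toDigitsCore_eq : ∀ (f n : ℕ) (acc : List Char), n < f → 0 < n →
    Nat.toDigitsCore 10 f n acc = ((Nat.digits 10 n).map Nat.digitChar).reverse ++ acc := by
  intro f
  induction f with
  | zero => intro n acc h; omega
  | succ f ih =>
    intro n acc hf hn
    by_cases h0 : n / 10 = 0
    · have hlt : n < 10 := by omega
      rw [Nat.digits_of_lt 10 n (by omega) hlt]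
      simp [Nat.toDigitsCore, h0, Nat.mod_eq_of_lt hlt]
    · have hrec := ih (n / 10) (Nat.digitChar (n % 10) :: acc) (by omega) (by omega)
      rw [Nat.digits_def' (by norm_num : (1:ℕ) < 10) hn]
      simp only [Nat.toDigitsCore, h0, if_false, hrec, List.map_cons, List.reverse_cons,
        List.append_assoc, List.cons_append, List.nil_append]

lemma toDigits_eq (n : ℕ) (hn : 0 < n) :
    Nat.toDigits 10 n = ((Nat.digits 10 n).map Nat.digitChar).reverse := by
  have := toDigitsCore_eq (n+1) n [] (by omega) hn
  simpa [Nat.toDigits] using this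

lemma digitChar_inj {a b : ℕ} (ha : a < 10) (hb : b < 10)
    (h : Nat.digitChar a = Nat.digitChar b) : a = b := by
  interval_cases a <;> interval_cases b <;> simp_all [Nat.digitChar]

lemma map_digitChar_inj : ∀ (l1 l2 : List ℕ), (∀ x ∈ l1, x < 10) → (∀ x ∈ l2, x < 10) →
    l1.map Nat.digitChar = l2.map Nat.digitChar → l1 = l2 := by
  intro l1
  induction l1 with
  | nil => intro l2 _ _ h; cases l2 <;> simp_all
  | cons a t ih =>
    intro l2 h1 h2 h
    cases l2 with
    | nil => simp_all
    | cons b t2 =>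
      simp only [List.map_cons, List.cons.injEq] at h
      have hab : a = b := digitChar_inj (h1 a (by simp)) (h2 b (by simp)) h.1
      rw [hab, ih t2 (fun x hx => h1 x (by simp [hx])) (fun x hx => h2 x (by simp [hx])) h.2]

lemma es_palindromo_iff_digits (n : Int) (h1 : 1 ≤ n) :
    es_palindromo n = true ↔ Nat.digits 10 n.toNat = (Nat.digits 10 n.toNat).reverse := by
  rw [es_palindromo_iff_list, PySem.Int.toList_toStr]
  have hchars : PySem.Int.toChars n = ((Nat.digits 10 n.toNat).map Nat.digitChar).reverse := by
    rw [show PySem.Int.toChars n = Nat.toDigits 10 n.toNat from by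
      simp [PySem.Int.toChars, show ¬ n < 0 by omega]]
    exact toDigits_eq n.toNat (by omega)
  rw [hchars]
  set l := Nat.digits 10 n.toNat with hl
  have hd : ∀ x ∈ l, x < 10 := fun x hx => Nat.digits_lt_base (by norm_num) hx
  constructor
  · intro h
    rw [List.reverse_reverse] at h
    have h' : l.reverse.map Nat.digitChar = l.map Nat.digitChar := by
      rw [List.map_reverse]; exact h
    exact (map_digitChar_inj l.reverse l (fun x hx => hd x (List.mem_reverse.mp hx)) hd h').symm
  · intro h
    conv_lhs => rw [← List.map_reverse, ← h]
    rw [List.reverse_reverse]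

-- ---- the mirrored candidates, characterised through Nat.digits ----

lemma digits_div10_tail (m : ℕ) : Nat.digits 10 (m / 10) = (Nat.digits 10 m).tail := by
  by_cases h : m = 0
  · simp [h]
  · conv_rhs => rw [Nat.digits_def' (by norm_num : (1:ℕ) < 10) (by omega : 0 < m)]
    rfl

lemma espejoLoop_eq : ∀ (f r p : ℕ), r < f →
    espejoLoop f (p : Int) (r : Int) =
      ((p * 10 ^ (Nat.digits 10 r).length + Nat.ofDigits 10 (Nat.digits 10 r).reverse : ℕ) : Int) := by
  intro f
  induction f with
  | zero => intro r p h; omega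
  | succ f ih =>
    intro r p hf
    by_cases hr : r = 0
    · subst hr
      simp [espejoLoop]
    · have hrpos : (0:Int) < (r:Int) := by exact_mod_cast Nat.pos_of_ne_zero hr
      have hmod : PySem.Int.mod (r:Int) 10 = ((r % 10 : ℕ) : Int) := by
        rw [PySem.Int.mod_eq_emod_of_pos (by norm_num)]
        push_cast
        rfl
      have hdiv : PySem.Int.floordiv (r:Int) 10 = ((r / 10 : ℕ) : Int) := by
        rw [PySem.Int.floordiv_eq_ediv_of_pos (by norm_num)]
        push_cast
        rfl
      have hstep : espejoLoop (f+1) (p:Int) (r:Int)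
          = espejoLoop f ((p * 10 + r % 10 : ℕ) : Int) ((r / 10 : ℕ) : Int) := by
        simp only [espejoLoop, if_pos hrpos, hmod, hdiv]
        norm_num
      rw [hstep, ih (r / 10) (p * 10 + r % 10) (by omega)]
      congr 1
      rw [Nat.digits_def' (by norm_num : (1:ℕ) < 10) (by omega : 0 < r)]
      simp only [List.reverse_cons, Nat.ofDigits_append, Nat.ofDigits_singleton,
        List.length_cons, List.length_reverse, pow_succ]
      ring

def candNat (mitad : ℕ) (impar : Bool) : ℕ :=
  mitad * 10 ^ (if impar then (Nat.digits 10 mitad).tail else Nat.digits 10 mitad).length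
    + Nat.ofDigits 10 (if impar then (Nat.digits 10 mitad).tail else Nat.digits 10 mitad).reverse

lemma espejo_eq (mitad : ℕ) (impar : Bool) :
    espejo (mitad : Int) impar = (candNat mitad impar : Int) := by
  simp only [espejo, candNat]
  cases impar with
  | false =>
    simp only [if_false, Bool.false_eq_true]
    have h := espejoLoop_eq ((mitad:Int).toNat + 1) mitad mitad (by omega)
    simpa using h
  | true =>
    simp only [if_true]
    have hdiv : PySem.Int.floordiv (mitad:Int) 10 = ((mitad / 10 : ℕ) : Int) := by
      rw [PySem.Int.floordiv_eq_ediv_of_pos (by norm_num)]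
      push_cast
      rfl
    rw [hdiv]
    have h := espejoLoop_eq (((mitad / 10 : ℕ):Int).toNat + 1) (mitad / 10) mitad (by omega)
    rw [h, digits_div10_tail]

lemma zeros_of_ofDigits_eq_zero : ∀ l : List ℕ, Nat.ofDigits 10 l = 0 → l = List.replicate l.length 0 := by
  intro l
  induction l with
  | nil => simp
  | cons d t ih =>
    intro h
    rw [Nat.ofDigits_cons] at h
    have hd : d = 0 ∧ Nat.ofDigits 10 t = 0 := by omega
    simp only [List.length_cons, List.replicate_succ, hd.1]
    rw [← ih hd.2]

lemma pad_digits : ∀ l : List ℕ, (∀ x ∈ l, x < 10) →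
    Nat.digits 10 (Nat.ofDigits 10 l) ++
      List.replicate (l.length - (Nat.digits 10 (Nat.ofDigits 10 l)).length) 0 = l := by
  intro l
  induction l with
  | nil => simp
  | cons d t ih =>
    intro hlt
    have hd10 : d < 10 := hlt d (by simp)
    rw [Nat.ofDigits_cons]
    by_cases h0 : d + 10 * Nat.ofDigits 10 t = 0
    · have hd : d = 0 ∧ Nat.ofDigits 10 t = 0 := by omega
      rw [h0]
      simp only [Nat.digits_zero, List.nil_append, List.length_nil, List.length_cons,
        Nat.sub_zero, List.replicate_succ, hd.1]
      rw [← zeros_of_ofDigits_eq_zero t hd.2]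
    · have hdig : Nat.digits 10 (d + 10 * Nat.ofDigits 10 t)
          = d :: Nat.digits 10 (Nat.ofDigits 10 t) := by
        rw [Nat.digits_def' (by norm_num : (1:ℕ) < 10) (by omega)]
        congr 1
        · omega
        · congr 1
          omega
      rw [hdig]
      simp only [List.length_cons, List.cons_append, List.cons.injEq, true_and]
      have : t.length + 1 - ((Nat.digits 10 (Nat.ofDigits 10 t)).length + 1)
          = t.length - (Nat.digits 10 (Nat.ofDigits 10 t)).length := by omega
      rw [this]
      exact ih (fun x hx => hlt x (by simp [hx]))

lemma digits_candNat (mitad : ℕ) (h : 0 < mitad) (impar : Bool) :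
    Nat.digits 10 (candNat mitad impar) =
      (if impar then (Nat.digits 10 mitad).tail else Nat.digits 10 mitad).reverse
        ++ Nat.digits 10 mitad := by
  set ds' := if impar then (Nat.digits 10 mitad).tail else Nat.digits 10 mitad with hds'
  have hsub : ∀ x ∈ ds', x < 10 := by
    intro x hx
    apply Nat.digits_lt_base (by norm_num : (1:ℕ) < 10) (m := mitad)
    rcases impar with _ | _
    · simpa [hds'] using hx
    · simp only [hds', if_true] at hx
      exact List.mem_of_mem_tail hx
  set r := Nat.ofDigits 10 ds'.reverse with hrdef
  have hrev10 : ∀ x ∈ ds'.reverse, x < 10 := fun x hx => hsub x (List.mem_reverse.mp hx)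
  have hr : r < 10 ^ ds'.length := by
    have := Nat.ofDigits_lt_base_pow_length (by norm_num : (1:ℕ) < 10) hrev10
    simpa using this
  have hlen : (Nat.digits 10 r).length ≤ ds'.length :=
    (Nat.digits_length_le_iff (by norm_num) r).mpr hr
  have hpad := pad_digits ds'.reverse hrev10
  have hk : (Nat.digits 10 r).length + (ds'.length - (Nat.digits 10 r).length) = ds'.length := by
    omega
  have happ := Nat.digits_append_zeroes_append_digits
    (b := 10) (k := ds'.length - (Nat.digits 10 r).length) (m := mitad) (n := r)
    (by norm_num) h
  rw [hk] at happ
  have hcand : candNat mitad impar = r + 10 ^ ds'.length * mitad := by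
    simp only [candNat]
    rw [← hds', ← hrdef]
    ring
  rw [hcand, ← happ]
  rw [List.length_reverse] at hpad
  rw [hpad]

lemma pal_candNat (mitad : ℕ) (h : 0 < mitad) (impar : Bool) :
    Nat.digits 10 (candNat mitad impar) = (Nat.digits 10 (candNat mitad impar)).reverse := by
  rw [digits_candNat mitad h impar]
  cases impar with
  | false => simp
  | true =>
    have hne : Nat.digits 10 mitad ≠ [] := Nat.digits_ne_nil_iff_ne_zero.mpr (by omega)
    obtain ⟨d, t, hdt⟩ := List.exists_cons_of_ne_nil hne
    rw [hdt]
    simp [List.reverse_append]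

lemma candNat_lt (m1 m2 : ℕ) (_h1 : 0 < m1) (hlt : m1 < m2)
    (hlen : (Nat.digits 10 m1).length = (Nat.digits 10 m2).length) (impar : Bool) :
    candNat m1 impar < candNat m2 impar := by
  have hlen' : (if impar then (Nat.digits 10 m1).tail else Nat.digits 10 m1).length
      = (if impar then (Nat.digits 10 m2).tail else Nat.digits 10 m2).length := by
    cases impar <;> simp [List.length_tail, hlen]
  set ds1' := if impar then (Nat.digits 10 m1).tail else Nat.digits 10 m1 with hd1
  set ds2' := if impar then (Nat.digits 10 m2).tail else Nat.digits 10 m2 with hd2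
  have hsub : ∀ x ∈ ds1', x < 10 := by
    intro x hx
    apply Nat.digits_lt_base (by norm_num : (1:ℕ) < 10) (m := m1)
    rcases impar with _ | _
    · simpa [hd1] using hx
    · simp only [hd1, if_true] at hx
      exact List.mem_of_mem_tail hx
  have hr1 : Nat.ofDigits 10 ds1'.reverse < 10 ^ ds1'.length := by
    have := Nat.ofDigits_lt_base_pow_length (by norm_num : (1:ℕ) < 10)
      (fun x hx => hsub x (List.mem_reverse.mp hx))
    simpa using this
  simp only [candNat]
  rw [← hd1, ← hd2, ← hlen']
  calc m1 * 10 ^ ds1'.length + Nat.ofDigits 10 ds1'.reverse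
      < m1 * 10 ^ ds1'.length + 10 ^ ds1'.length := by omega
    _ = (m1 + 1) * 10 ^ ds1'.length := by ring
    _ ≤ m2 * 10 ^ ds1'.length := by
        have : m1 + 1 ≤ m2 := hlt
        exact Nat.mul_le_mul_right _ this
    _ ≤ m2 * 10 ^ ds1'.length + Nat.ofDigits 10 ds2'.reverse := by omega

lemma digits_div_pow (n : ℕ) : ∀ k : ℕ, Nat.digits 10 (n / 10 ^ k) = (Nat.digits 10 n).drop k := by
  intro k
  induction k with
  | zero => simp
  | succ k ih =>
    have : n / 10 ^ (k+1) = n / 10 ^ k / 10 := by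
      rw [Nat.div_div_eq_div_mul, pow_succ]
    rw [this, digits_div10_tail, ih, List.tail_drop]

lemma digits_candNat_odd (mitad : ℕ) (h : 0 < mitad) :
    Nat.digits 10 (candNat mitad true) =
      (Nat.digits 10 mitad).tail.reverse ++ Nat.digits 10 mitad := by
  rw [digits_candNat mitad h]
  simp

lemma digits_candNat_even (mitad : ℕ) (h : 0 < mitad) :
    Nat.digits 10 (candNat mitad false) =
      (Nat.digits 10 mitad).reverse ++ Nat.digits 10 mitad := by
  rw [digits_candNat mitad h]
  simp

lemma cand_surj (p L : ℕ) (hp : 0 < p) (hL : (Nat.digits 10 p).length = L)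
    (hpal : Nat.digits 10 p = (Nat.digits 10 p).reverse) :
    (Nat.digits 10 (p / 10 ^ (L / 2))).length = L - L / 2 ∧
    candNat (p / 10 ^ (L / 2)) (L % 2 == 1) = p := by
  have hL1 : 1 ≤ L := by
    have hne : Nat.digits 10 p ≠ [] := Nat.digits_ne_nil_iff_ne_zero.mpr (by omega)
    have hlp := List.length_pos_iff.mpr hne
    omega
  have hdm : Nat.digits 10 (p / 10 ^ (L / 2)) = (Nat.digits 10 p).drop (L / 2) :=
    digits_div_pow p (L / 2)
  have hlm : (Nat.digits 10 (p / 10 ^ (L / 2))).length = L - L / 2 := by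
    rw [hdm, List.length_drop, hL]
  refine ⟨hlm, ?_⟩
  have hm0 : 0 < p / 10 ^ (L / 2) := by
    rcases Nat.eq_zero_or_pos (p / 10 ^ (L / 2)) with h0 | h0
    · exfalso
      rw [h0] at hlm
      simp at hlm
      omega
    · exact h0
  have hkey : ∀ k : ℕ, ((Nat.digits 10 p).drop k).reverse = (Nat.digits 10 p).take (L - k) := by
    intro k
    conv_lhs => rw [hpal]
    rw [List.drop_reverse, List.reverse_reverse, hL]
  have hdigeq : Nat.digits 10 (candNat (p / 10 ^ (L / 2)) (L % 2 == 1)) = Nat.digits 10 p := by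
    by_cases hpar : L % 2 = 1
    · have hb : (L % 2 == 1) = true := by simp [hpar]
      rw [hb, digits_candNat_odd _ hm0, hdm, List.tail_drop, hkey]
      rw [show L - (L / 2 + 1) = L / 2 from by omega]
      exact List.take_append_drop _ _
    · have hb : (L % 2 == 1) = false := by simp [hpar]
      rw [hb, digits_candNat_even _ hm0, hdm, hkey]
      rw [show L - L / 2 = L / 2 from by omega]
      exact List.take_append_drop _ _
  exact Nat.digits_inj_iff.mp hdigeq

-- digit-length of a candidate built for target length L
lemma len_candNat_L (mitad L : ℕ) (hL : 1 ≤ L)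
    (hlm : (Nat.digits 10 mitad).length = L - L / 2) (hm : 0 < mitad) :
    (Nat.digits 10 (candNat mitad (L % 2 == 1))).length = L := by
  by_cases hpar : L % 2 = 1
  · have hb : (L % 2 == 1) = true := by simp [hpar]
    rw [hb, digits_candNat_odd _ hm]
    simp only [List.length_append, List.length_reverse, List.length_tail]
    omega
  · have hb : (L % 2 == 1) = false := by simp [hpar]
    rw [hb, digits_candNat_even _ hm]
    simp only [List.length_append, List.length_reverse]
    omega

-- ---- the inner loop over the halves ----

lemma buscaMitades_none (numero : Int) (impar : Bool) :
    ∀ lst : List Int,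
    (∀ mitad ∈ lst, ¬ (numero ≤ espejo mitad impar ∧ esPrimoB (espejo mitad impar) = true)) →
    buscaMitades numero impar lst = none := by
  intro lst
  induction lst with
  | nil => intro _; rfl
  | cons m ms ih =>
    intro hall
    simp only [buscaMitades, if_neg (hall m (by simp))]
    exact ih (fun x hx => hall x (by simp [hx]))

lemma buscaMitades_finds (numero : Int) (impar : Bool) :
    ∀ (k : Nat) (a b mt : Int), a ≤ mt → mt < b → mt = a + k →
    (∀ m, a ≤ m → m < mt → ¬ (numero ≤ espejo m impar ∧ esPrimoB (espejo m impar) = true)) →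
    (numero ≤ espejo mt impar ∧ esPrimoB (espejo mt impar) = true) →
    buscaMitades numero impar (PySem.List.pyRange a b 1) = some (espejo mt impar) := by
  intro k
  induction k with
  | zero =>
    intro a b mt h1 h2 hk hfail hok
    have ha : mt = a := by omega
    subst ha
    rw [PySem.List.pyRange_one_cons (by omega)]
    simp [buscaMitades, if_pos hok]
  | succ k ih =>
    intro a b mt h1 h2 hk hfail hok
    rw [PySem.List.pyRange_one_cons (by omega)]
    simp only [buscaMitades, if_neg (hfail a (by omega) (by omega))]
    exact ih (a+1) b mt (by omega) h2 (by omega) (fun m hm1 hm2 => hfail m (by omega) hm2) hok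

-- ---- a palindromic prime above 2^31, certifying that both searches terminate on Dom ----

-- binary modular exponentiation with logarithmic kernel recursion depth,
-- used only to certify the prime 10000500001 (Lucas primality test)
def powModFast (b : Nat) : Nat → Nat → Nat → Nat
  | 0, _, m => 1 % m
  | fuel+1, e, m =>
    if e = 0 then 1 % m
    else
      let h := powModFast b fuel (e/2) m
      if e % 2 = 0 then (h * h) % m else ((h * h) % m) * (b % m) % m

lemma powModFast_eq (b : Nat) : ∀ fuel e m, e < 2^fuel →
    powModFast b fuel e m = (b ^ e) % m := by
  intro fuel
  induction fuel with
  | zero =>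
    intro e m he
    interval_cases e
    simp [powModFast]
  | succ fuel ih =>
    intro e m he
    by_cases h0 : e = 0
    · simp [powModFast, h0]
    · have hrec : powModFast b fuel (e/2) m = (b ^ (e/2)) % m :=
        ih (e/2) m (by omega)
      have hsplit : b ^ e = (b ^ (e/2)) * (b ^ (e/2)) * b ^ (e % 2) := by
        rw [← pow_add, ← pow_add]
        congr 1
        omega
      simp only [powModFast, if_neg h0, hrec]
      by_cases hpar : e % 2 = 0
      · rw [if_pos hpar, hsplit, hpar, pow_zero, mul_one]
        conv_rhs => rw [Nat.mul_mod]
      · rw [if_neg hpar, hsplit, (by omega : e % 2 = 1), pow_one]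
        conv_rhs => rw [Nat.mul_mod (b^(e/2) * b^(e/2)) b, Nat.mul_mod (b^(e/2)) (b^(e/2))]

lemma zmod_pow_eq (e r : Nat) (hr : powModFast 11 34 e 10000500001 = r) (he : e < 2^34) :
    (11 : ZMod 10000500001) ^ e = (r : ZMod 10000500001) := by
  have h := (powModFast_eq 11 34 e 10000500001 he).symm.trans hr
  calc (11 : ZMod 10000500001) ^ e
      = ((11 ^ e : Nat) : ZMod 10000500001) := by push_cast; ring
    _ = (((11 ^ e) % 10000500001 : Nat) : ZMod 10000500001) := by
        rw [ZMod.natCast_mod]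
    _ = (r : ZMod 10000500001) := by rw [h]

lemma ne_one_zmod (r : Nat) (h1 : 1 < r) (h2 : r < 10000500001) :
    (r : ZMod 10000500001) ≠ 1 := by
  haveI : Fact (1 < 10000500001) := ⟨by norm_num⟩
  intro h
  have := congrArg ZMod.val h
  rw [ZMod.val_natCast_of_lt h2, ZMod.val_one] at this
  omega

lemma prime_P : Nat.Prime 10000500001 := by
  apply lucas_primality 10000500001 (11 : ZMod 10000500001)
  · show (11 : ZMod 10000500001) ^ (10000500001 - 1) = 1
    have : (10000500001 - 1 : Nat) = 10000500000 := by norm_num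
    rw [this, zmod_pow_eq 10000500000 1 (by decide) (by norm_num)]
    norm_num
  · intro q hq hdvd
    have hd : q ∣ 2^5 * 3 * 5^6 * 59 * 113 := by
      have : (10000500001 - 1 : Nat) = 2^5 * 3 * 5^6 * 59 * 113 := by norm_num
      rwa [this] at hdvd
    have hq15 : q = 2 ∨ q = 3 ∨ q = 5 ∨ q = 59 ∨ q = 113 := by
      rcases (Nat.Prime.dvd_mul hq).mp hd with h | h
      · rcases (Nat.Prime.dvd_mul hq).mp h with h | h
        · rcases (Nat.Prime.dvd_mul hq).mp h with h | h
          · rcases (Nat.Prime.dvd_mul hq).mp h with h | h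
            · left; exact (Nat.prime_dvd_prime_iff_eq hq (by norm_num)).mp (hq.dvd_of_dvd_pow h)
            · right; left; exact (Nat.prime_dvd_prime_iff_eq hq (by norm_num)).mp h
          · right; right; left; exact (Nat.prime_dvd_prime_iff_eq hq (by norm_num)).mp (hq.dvd_of_dvd_pow h)
        · right; right; right; left; exact (Nat.prime_dvd_prime_iff_eq hq (by norm_num)).mp h
      · right; right; right; right; exact (Nat.prime_dvd_prime_iff_eq hq (by norm_num)).mp h
    have : (10000500001 - 1 : Nat) = 10000500000 := by norm_num
    rw [this]
    rcases hq15 with h | h | h | h | h <;> subst h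
    · rw [show (10000500000 / 2 : Nat) = 5000250000 from by norm_num,
        zmod_pow_eq 5000250000 10000500000 (by decide) (by norm_num)]
      exact ne_one_zmod _ (by norm_num) (by norm_num)
    · rw [show (10000500000 / 3 : Nat) = 3333500000 from by norm_num,
        zmod_pow_eq 3333500000 845394489 (by decide) (by norm_num)]
      exact ne_one_zmod _ (by norm_num) (by norm_num)
    · rw [show (10000500000 / 5 : Nat) = 2000100000 from by norm_num,
        zmod_pow_eq 2000100000 3616367511 (by decide) (by norm_num)]
      exact ne_one_zmod _ (by norm_num) (by norm_num)
    · rw [show (10000500000 / 59 : Nat) = 169500000 from by norm_num,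
        zmod_pow_eq 169500000 9027908157 (by decide) (by norm_num)]
      exact ne_one_zmod _ (by norm_num) (by norm_num)
    · rw [show (10000500000 / 113 : Nat) = 88500000 from by norm_num,
        zmod_pow_eq 88500000 7348255017 (by decide) (by norm_num)]
      exact ne_one_zmod _ (by norm_num) (by norm_num)

lemma nsd_P : NoSmallDiv 10000500001 := by
  intro e he hee hdvd
  have hcast : ((e.toNat : Int)) = e := Int.toNat_of_nonneg (by omega)
  have h1 : (e.toNat : Nat) ∣ 10000500001 := by
    have : (e.toNat : Int) ∣ (10000500001 : Int) := hcast ▸ hdvd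
    exact_mod_cast this
  rcases (Nat.Prime.eq_one_or_self_of_dvd prime_P e.toNat h1) with h | h
  · omega
  · have : e = 10000500001 := by omega
    subst this
    nlinarith

lemma pal_P : es_palindromo 10000500001 = true := by decide

lemma pred_P : (es_palindromo 10000500001 && es_primo 10000500001) = true := by
  rw [pal_P, (esPrimoA_iff 10000500001).mpr ⟨by norm_num, nsd_P⟩]
  rfl

lemma pred_two : (es_palindromo 2 && es_primo 2) = true := by decide

lemma pred_lt_two (x : Int) (hx : x < 2) : (es_palindromo x && es_primo x) = false := by
  have hfp : es_primo x = false := by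
    cases h : es_primo x
    · rfl
    · have := ((esPrimoA_iff x).mp h).1; omega
  simp [hfp]

lemma buscaA_finds : ∀ fuel (m t : Int), (es_palindromo t && es_primo t) = true →
    m + 1 ≤ t → (t - m).toNat ≤ fuel →
    (∀ x, m + 1 ≤ x → x < t → (es_palindromo x && es_primo x) = false) →
    buscaA fuel m = t := by
  intro fuel
  induction fuel with
  | zero => intro m t ht hmt hb hmin; omega
  | succ fuel ih =>
    intro m t ht hmt hb hmin
    by_cases he : t = m + 1
    · subst he
      simp [buscaA, ht]
    · have hlt : m + 1 < t := by omega
      have hf : (es_palindromo (m+1) && es_primo (m+1)) = false := hmin (m+1) (by omega) hlt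
      simp only [buscaA, hf, Bool.false_eq_true, if_false]
      exact ih (m+1) t ht (by omega) (by omega) (fun x h1 h2 => hmin x (by omega) h2)

-- ---- both programs return the least palindromic prime ≥ numero ----
lemma main_eq : ∀ (numero : Int), -2147483648 ≤ numero → numero ≤ 2147483648 →
    devuelve_palindromo_primo_cercano numero = devuelve_palindromo_primo_cercano_alt numero := by
  intro numero hlo hhi
  have hex : ∃ k : Nat, (es_palindromo (numero + k) && es_primo (numero + k)) = true := by
    refine ⟨(10000500001 - numero).toNat, ?_⟩
    have h : numero + (((10000500001 - numero).toNat : Int)) = 10000500001 := by omega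
    rw [h]
    exact pred_P
  set k0 := Nat.find hex with hk0
  set t := numero + (k0 : Int) with htdef
  have hpt : (es_palindromo t && es_primo t) = true := Nat.find_spec hex
  have hmin : ∀ x, numero ≤ x → x < t → (es_palindromo x && es_primo x) = false := by
    intro x h1 h2
    have hj : x = numero + ((x - numero).toNat : Int) := by omega
    have hjlt : (x - numero).toNat < k0 := by omega
    have hnm := Nat.find_min hex hjlt
    rw [← hj] at hnm
    exact Bool.eq_false_iff.mpr hnm
  have htP : t ≤ 10000500001 := by
    have h2 := Nat.find_min' hex (m := (10000500001 - numero).toNat) (by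
      have h : numero + (((10000500001 - numero).toNat : Int)) = 10000500001 := by omega
      rw [h]; exact pred_P)
    omega
  have htge : numero ≤ t := by omega
  have hA : devuelve_palindromo_primo_cercano numero = t := by
    apply buscaA_finds 17179869184 (numero - 1) t hpt (by omega) (by omega)
    intro x h1 h2
    exact hmin x (by omega) h2
  rw [hA]
  by_cases hsmall : numero ≤ 2
  · have ht2' : t = 2 := by
      rcases lt_or_ge t 2 with h | h
      · exfalso; rw [pred_lt_two t h] at hpt; exact Bool.false_ne_true hpt
      · rcases lt_or_ge 2 t with hgt | hle
        · have hc := hmin 2 (by omega) hgt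
          rw [pred_two] at hc
          exact absurd hc (by decide)
        · omega
    rw [devuelve_palindromo_primo_cercano_alt, if_pos hsmall, ht2']
  · -- numero ≥ 3 : B's palindromo-generator reaches exactly t
    have h3 : 3 ≤ numero := by omega
    have ht2 : ¬ t ≤ 2 := by omega
    have ht3 : 3 ≤ t := by omega
    simp only [Bool.and_eq_true] at hpt
    set T := t.toNat with hTdef
    have htT : (T : Int) = t := by omega
    have hpalT : Nat.digits 10 T = (Nat.digits 10 T).reverse :=
      (es_palindromo_iff_digits t (by omega)).mp hpt.1
    set P := Nat.digits 10 T with hP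
    set LT := P.length with hLT
    have hT0 : 0 < T := by omega
    have hLT1 : 1 ≤ LT := by
      have hne : P ≠ [] := Nat.digits_ne_nil_iff_ne_zero.mpr (by omega)
      have := List.length_pos_iff.mpr hne
      omega
    -- t < 10^LT and 10^(LT-1) ≤ t
    have hTlt : T < 10 ^ LT := by
      have := (Nat.digits_length_le_iff (by norm_num : (1:ℕ) < 10) T).mp (le_of_eq hLT.symm)
      exact this
    -- a candidate shorter than LT is < t ; one of length L with L < LT:
    have hlen_lt : ∀ q : ℕ, (Nat.digits 10 q).length < LT → (q : Int) < t := by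
      intro q hq
      have h1 : q < 10 ^ (LT - 1) :=
        (Nat.digits_length_le_iff (b := 10) (k := LT - 1) (by norm_num) q).mp (by omega)
      have h2 : 10 ^ (LT - 1) ≤ T :=
        (Nat.lt_digits_length_iff (b := 10) (k := LT - 1) (by norm_num) T).mp
          (by rw [← hP, ← hLT]; omega)
      omega
    -- a candidate of digit-length L that is a palindromic prime ≥ numero must be ≥ t
    have hfail : ∀ q : ℕ, 3 ≤ (q:Int) → (q:Int) < t → numero ≤ (q:Int) →
        Nat.digits 10 q = (Nat.digits 10 q).reverse → esPrimoB (q:Int) = false := by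
      intro q hq3 hqt hqn hqpal
      by_contra hc
      have hprime : esPrimoB (q:Int) = true := by
        cases h : esPrimoB (q:Int)
        · exact absurd h hc
        · rfl
      have hA' : es_primo (q:Int) = true := by
        rw [primo_eq (q:Int) hq3]; exact hprime
      have hpal' : es_palindromo (q:Int) = true := by
        rw [es_palindromo_iff_digits (q:Int) (by omega)]
        simpa using hqpal
      have := hmin (q:Int) hqn hqt
      rw [hpal', hA'] at this
      simp at this
    -- the starting length L0
    set N := numero.toNat with hNdef
    set L0 := (Nat.digits 10 N).length with hL0
    have hN3 : 3 ≤ N := by omega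
    have hL01 : 1 ≤ L0 := by
      have hne : Nat.digits 10 N ≠ [] := Nat.digits_ne_nil_iff_ne_zero.mpr (by omega)
      have := List.length_pos_iff.mpr hne
      omega
    have hL0LT : L0 ≤ LT := by
      by_contra hc
      have hTlt' : T < 10 ^ (L0 - 1) :=
        (Nat.digits_length_le_iff (b := 10) (k := L0 - 1) (by norm_num) T).mp
          (by rw [← hP, ← hLT]; omega)
      have hNge : 10 ^ (L0 - 1) ≤ N :=
        (Nat.lt_digits_length_iff (b := 10) (k := L0 - 1) (by norm_num) N).mp
          (by rw [← hL0]; omega)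
      omega
    have hLT11 : LT ≤ 11 := by
      apply (Nat.digits_length_le_iff (by norm_num : (1:ℕ) < 10) T).mpr
      have : T ≤ 10000500001 := by omega
      calc T ≤ 10000500001 := this
        _ < 10 ^ 11 := by norm_num
    -- one step of the outer loop, for any length L
    have hstep : ∀ L : ℕ, 1 ≤ L →
        ∀ fuel, buscaLongitudes numero (fuel+1) (L : Int) =
          (match buscaMitades numero ((L % 2 == 1 : Bool))
              (PySem.List.pyRange ((10 ^ (L - L/2 - 1) : ℕ) : Int) ((10 ^ (L - L/2) : ℕ) : Int) 1) with
           | some p => p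
           | none => buscaLongitudes numero fuel ((L : Int) + 1)) := by
      intro L hL fuel
      have hdiv : PySem.Int.floordiv (L:Int) 2 = ((L / 2 : ℕ) : Int) := by
        rw [PySem.Int.floordiv_eq_ediv_of_pos (by norm_num)]
        push_cast
        rfl
      have hmit : (L:Int) - ((L / 2 : ℕ) : Int) = ((L - L/2 : ℕ) : Int) := by
        push_cast [Nat.cast_sub (Nat.div_le_self L 2)]
        ring
      have him : (PySem.Int.mod (L:Int) 2 == 1) = (L % 2 == 1 : Bool) := by
        rw [PySem.Int.mod_eq_emod_of_pos (by norm_num)]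
        rcases Nat.mod_two_eq_zero_or_one L with h | h
        · have : ((L:Int)) % 2 = 0 := by omega
          simp [this, h]
        · have : ((L:Int)) % 2 = 1 := by omega
          simp [this, h]
      have h1 : ((((L - L/2 : ℕ) : Int)) - 1).toNat = L - L/2 - 1 := by omega
      have h2 : ((((L - L/2 : ℕ) : Int))).toNat = L - L/2 := by omega
      simp only [buscaLongitudes, hdiv, hmit, him, h1, h2]
      norm_cast
    -- the inner loop at a length L < LT finds nothing
    have hnone : ∀ L : ℕ, 1 ≤ L → L < LT →
        buscaMitades numero ((L % 2 == 1 : Bool))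
          (PySem.List.pyRange ((10 ^ (L - L/2 - 1) : ℕ) : Int) ((10 ^ (L - L/2) : ℕ) : Int) 1) = none := by
      intro L hL hLlt
      apply buscaMitades_none
      intro mitad hm
      rw [PySem.List.mem_pyRange_one] at hm
      have hm0 : (0:Int) < mitad := by
        have : (0:Int) < ((10 ^ (L - L/2 - 1) : ℕ) : Int) := by positivity
        omega
      set mn := mitad.toNat with hmn
      have hcastm : (mn : Int) = mitad := by omega
      have hrange : 10 ^ (L - L/2 - 1) ≤ mn ∧ mn < 10 ^ (L - L/2) := by
        constructor <;> [exact_mod_cast (by omega : ((10 ^ (L - L/2 - 1) : ℕ) : Int) ≤ (mn:Int));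
          exact_mod_cast (by omega : ((mn:Int)) < ((10 ^ (L - L/2) : ℕ) : Int))]
      have hlenm : (Nat.digits 10 mn).length = L - L/2 := by
        have hle := (Nat.digits_length_le_iff (by norm_num : (1:ℕ) < 10) mn).mpr hrange.2
        have hge := (Nat.lt_digits_length_iff (by norm_num : (1:ℕ) < 10) mn).mpr hrange.1
        omega
      have hmpos : 0 < mn := by omega
      rw [← hcastm, espejo_eq]
      set q := candNat mn (L % 2 == 1) with hq
      have hlenq : (Nat.digits 10 q).length = L := len_candNat_L mn L hL hlenm hmpos
      have hqt : (q : Int) < t := hlen_lt q (by omega)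
      intro ⟨hge, hpr⟩
      have hq3 : 3 ≤ (q:Int) := by omega
      have := hfail q hq3 hqt hge (pal_candNat mn hmpos _)
      rw [this] at hpr
      exact Bool.false_ne_true hpr
    -- the inner loop at length LT returns exactly t
    have hsome : buscaMitades numero ((LT % 2 == 1 : Bool))
        (PySem.List.pyRange ((10 ^ (LT - LT/2 - 1) : ℕ) : Int) ((10 ^ (LT - LT/2) : ℕ) : Int) 1)
        = some t := by
      have hsurj := cand_surj T LT hT0 (by rw [← hP, ← hLT]) hpalT
      obtain ⟨mt, hmtdef⟩ : ∃ m : ℕ, T / 10 ^ (LT / 2) = m := ⟨_, rfl⟩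
      rw [hmtdef] at hsurj
      obtain ⟨hmtlen, hmtc⟩ := hsurj
      have hmt0 : 0 < mt := by
        by_contra hc
        have : mt = 0 := by omega
        rw [this] at hmtlen
        simp at hmtlen
        omega
      have hmtrange : 10 ^ (LT - LT/2 - 1) ≤ mt ∧ mt < 10 ^ (LT - LT/2) := by
        constructor
        · exact (Nat.lt_digits_length_iff (by norm_num : (1:ℕ) < 10) mt).mp (by omega)
        · exact (Nat.digits_length_le_iff (by norm_num : (1:ℕ) < 10) mt).mp (by omega)
      have hesp : espejo ((mt:ℕ):Int) ((LT % 2 == 1 : Bool)) = t := by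
        rw [espejo_eq, hmtc, htT]
      have hok : numero ≤ espejo ((mt:ℕ):Int) ((LT % 2 == 1 : Bool)) ∧
          esPrimoB (espejo ((mt:ℕ):Int) ((LT % 2 == 1 : Bool))) = true := by
        rw [hesp]
        refine ⟨htge, ?_⟩
        rw [← primo_eq t ht3]
        exact hpt.2
      have hfind := buscaMitades_finds numero ((LT % 2 == 1 : Bool))
        ((mt : Int) - ((10 ^ (LT - LT/2 - 1) : ℕ) : Int)).toNat
        ((10 ^ (LT - LT/2 - 1) : ℕ) : Int) ((10 ^ (LT - LT/2) : ℕ) : Int) ((mt:ℕ):Int)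
        (by exact_mod_cast Nat.cast_le.mpr hmtrange.1)
        (by exact_mod_cast Nat.cast_lt.mpr hmtrange.2)
        (by
          have : ((10 ^ (LT - LT/2 - 1) : ℕ) : Int) ≤ (mt:Int) := by exact_mod_cast Nat.cast_le.mpr hmtrange.1
          omega)
        (by
          intro m hm1 hm2
          have hm0 : (0:Int) < m := by
            have : (0:Int) < ((10 ^ (LT - LT/2 - 1) : ℕ) : Int) := by positivity
            omega
          set mn := m.toNat with hmn
          have hcastm : (mn : Int) = m := by omega
          have hrange : 10 ^ (LT - LT/2 - 1) ≤ mn ∧ mn < 10 ^ (LT - LT/2) := by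
            constructor
            · exact_mod_cast (by omega : ((10 ^ (LT - LT/2 - 1) : ℕ) : Int) ≤ (mn:Int))
            · have : mn < mt := by omega
              omega
          have hlenm : (Nat.digits 10 mn).length = LT - LT/2 := by
            have hle := (Nat.digits_length_le_iff (by norm_num : (1:ℕ) < 10) mn).mpr
              (by omega : mn < 10 ^ (LT - LT/2))
            have hge := (Nat.lt_digits_length_iff (by norm_num : (1:ℕ) < 10) mn).mpr hrange.1
            omega
          have hmpos : 0 < mn := by omega
          rw [← hcastm, espejo_eq]
          set q := candNat mn (LT % 2 == 1) with hq
          have hqlt : q < T := by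
            have := candNat_lt mn mt hmpos (by omega) (by rw [hlenm, hmtlen]) (LT % 2 == 1)
            rw [hmtc] at this
            exact this
          intro ⟨hge, hpr⟩
          have hq3 : 3 ≤ (q:Int) := by omega
          have := hfail q hq3 (by omega) hge (pal_candNat mn hmpos _)
          rw [this] at hpr
          exact Bool.false_ne_true hpr)
        hok
      rw [hfind, hesp]
    -- run the outer loop
    have houter : ∀ fuel (L : ℕ), 1 ≤ L → L ≤ LT → LT - L < fuel →
        buscaLongitudes numero fuel (L : Int) = t := by
      intro fuel
      induction fuel with
      | zero => intro L h1 h2 h3; exact absurd h3 (by omega)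
      | succ fuel ih =>
        intro L h1 h2 h3
        by_cases hE : L = LT
        · rw [hstep L h1 fuel, hE, hsome]
        · have hlt : L < LT := by omega
          rw [hstep L h1 fuel, hnone L h1 hlt]
          have : ((L:Int) + 1) = ((L+1 : ℕ) : Int) := by push_cast; ring
          rw [this]
          exact ih (L+1) (by omega) (by omega) (by omega)
    -- the port's starting length equals L0
    have hstart : PySem.Str.len (PySem.Int.toStr numero) = (L0 : Int) := by
      rw [PySem.Str.len_eq, PySem.Int.toList_toStr]
      rw [show PySem.Int.toChars numero = Nat.toDigits 10 N from by
        simp [PySem.Int.toChars, show ¬ numero < 0 by omega, hNdef]]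
      rw [toDigits_eq N (by omega)]
      simp [hL0]
    rw [devuelve_palindromo_primo_cercano_alt, if_neg (by omega), hstart]
    exact (houter 64 L0 hL01 hL0LT (by omega)).symm

-- ===== VERDICT (by name: the statement is the Claim_ definition above) =====
theorem devuelve_palindromo_primo_cercano_spec : Claim_equal_devuelve_palindromo_primo_cercano := by
  intro numero hdom
  have h : -2147483648 ≤ numero ∧ numero ≤ 2147483648 := by
    simpa [Dom_devuelve_palindromo_primo_cercano, pvDomInt] using hdom
  unfold Spec_devuelve_palindromo_primo_cercano
  exact main_eq numero h.1 h.2
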